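-- pv_equiv track=rewrite | github.com/buihungson/PythonCodePTIT | PY01011_LIET_KE_SO_DEP.py | check
-- ===== SOURCE A (Python) =====
-- def check(s):
--     if len(s) % 2 != 0:
--         return False
--     if s != s[::-1]:
--         return False
--     for char in s:
--         if char not in '02468':
--             return False
--     return True
-- ===== SOURCE B (Python) =====
-- def check(s):
--     n = len(s)
--     if n % 2 != 0:
--         return False
--     for i in range(n // 2):
--         if s[i] != s[n - 1 - i] or s[i] not in '02468':
--             return False
--     return True
-- ===== Notes on version B (the rewrite author's own statement) =====
-- stated objective: alternative
-- what changed: Fuses A's three full passes (reverse+compare palindrome test and a separate all-digits-even scan) into one half-length loop that checks the mirror equality and the even-digit condition together, relying on the mirror symmetry to cover the second half.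
import Mathlib
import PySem

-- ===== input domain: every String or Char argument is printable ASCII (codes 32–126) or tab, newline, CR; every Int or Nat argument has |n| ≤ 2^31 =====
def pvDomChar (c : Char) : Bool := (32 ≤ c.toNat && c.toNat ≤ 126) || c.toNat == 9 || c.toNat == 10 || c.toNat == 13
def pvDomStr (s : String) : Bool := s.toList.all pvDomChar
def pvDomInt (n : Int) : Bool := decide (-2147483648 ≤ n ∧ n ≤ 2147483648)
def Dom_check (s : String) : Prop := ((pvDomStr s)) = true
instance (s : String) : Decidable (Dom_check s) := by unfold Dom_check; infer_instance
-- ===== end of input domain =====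

-- B fuses A's three full passes (reverse-compare palindrome test + even-digit scan) into one half-length mirror loop; alternative decomposition, same asymptotic cost.

-- ===== PORT A =====
-- if len(s) % 2 != 0: False; if s != s[::-1]: False; for char in s: if char not in '02468': False; True
def check (s : String) : Bool :=
  if PySem.Int.mod (s.toList.length : Int) 2 ≠ 0 then false
  else if s.toList ≠ s.toList.reverse then false
  else s.toList.all (fun c => decide (c ∈ ['0', '2', '4', '6', '8']))

-- ===== PORT B =====
-- n = len(s); if n % 2 != 0: False; for i in range(n//2): if s[i] != s[n-1-i] or s[i] not in '02468': False; True
def check_alt (s : String) : Bool :=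
  if PySem.Int.mod (s.toList.length : Int) 2 ≠ 0 then false
  else (PySem.List.pyRange 0 (PySem.Int.floordiv (s.toList.length : Int) 2) 1).all (fun i =>
    !(decide (PySem.List.pyGetD s.toList i ' ' ≠ PySem.List.pyGetD s.toList ((s.toList.length : Int) - 1 - i) ' '
      ∨ PySem.List.pyGetD s.toList i ' ' ∉ ['0', '2', '4', '6', '8'])))

-- ===== PRECONDITION & SPEC =====
def Spec_check (s : String) (out : Bool) : Prop := out = check_alt s
instance (s : String) (out : Bool) : Decidable (Spec_check s out) := by unfold Spec_check; infer_instance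

-- ===== CLAIM (what is proved, stated in full; the proofs are below) =====
def Claim_equal_check : Prop := ∀ (s : String), Dom_check s → Spec_check s (check s)

-- ===== LEMMAS AND PROOFS =====
def E : List Char := ['0','2','4','6','8']

theorem getD_rev (cs : List Char) (k : Nat) (h : k < cs.length) :
    cs.reverse.getD k ' ' = cs.getD (cs.length - 1 - k) ' ' := by
  rw [List.getD_eq_getElem?_getD, List.getD_eq_getElem?_getD,
    List.getElem?_reverse h]

theorem fwd (cs : List Char)
    (hpal : cs = cs.reverse) (hall : ∀ c ∈ cs, c ∈ E)
    (k : Nat) (hk : k < cs.length / 2) :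
    cs.getD k ' ' = cs.getD (cs.length - 1 - k) ' ' ∧ cs.getD k ' ' ∈ E := by
  have h1 : k < cs.length := by omega
  refine ⟨?_, hall _ (List.getD_eq_getElem cs ' ' h1 ▸ List.getElem_mem _)⟩
  conv_lhs => rw [hpal]
  exact getD_rev cs k h1

theorem bwd (cs : List Char) (he : cs.length % 2 = 0)
    (h : ∀ k < cs.length / 2, cs.getD k ' ' = cs.getD (cs.length - 1 - k) ' ' ∧ cs.getD k ' ' ∈ E) :
    cs = cs.reverse ∧ ∀ c ∈ cs, c ∈ E := by
  have hmir : ∀ k < cs.length, cs.getD k ' ' = cs.getD (cs.length - 1 - k) ' ' := by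
    intro k hk
    by_cases hlt : k < cs.length / 2
    · exact (h k hlt).1
    · have h2 : cs.length - 1 - k < cs.length / 2 := by omega
      have := (h _ h2).1
      rw [show cs.length - 1 - (cs.length - 1 - k) = k by omega] at this
      exact this.symm
  constructor
  · apply List.ext_getElem (by simp)
    intro i hi hi'
    have := hmir i hi
    rw [List.getD_eq_getElem cs ' ' hi, List.getD_eq_getElem cs ' ' (by omega)] at this
    rw [this, List.getElem_reverse]
  · intro c hc
    obtain ⟨i, hi, rfl⟩ := List.mem_iff_getElem.mp hc
    by_cases hlt : i < cs.length / 2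
    · have := (h i hlt).2
      rwa [List.getD_eq_getElem cs ' ' hi] at this
    · have h2 : cs.length - 1 - i < cs.length / 2 := by omega
      have := (h _ h2).2
      have hm := hmir (cs.length - 1 - i) (by omega)
      rw [show cs.length - 1 - (cs.length - 1 - i) = i by omega] at hm
      rw [hm] at this
      rwa [List.getD_eq_getElem cs ' ' (by omega)] at this

theorem body_iff (cs : List Char) (k : Nat) (hk : k < cs.length / 2) :
    (!(decide (¬ PySem.List.pyGetD cs (k : Int) ' ' = PySem.List.pyGetD cs ((cs.length : Int) - 1 - (k : Int)) ' '
        ∨ PySem.List.pyGetD cs (k : Int) ' ' ∉ ['0', '2', '4', '6', '8']))) = true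
    ↔ (cs.getD k ' ' = cs.getD (cs.length - 1 - k) ' ' ∧ cs.getD k ' ' ∈ E) := by
  have hc : ((cs.length : Int) - 1 - (k : Int)) = ((cs.length - 1 - k : Nat) : Int) := by omega
  rw [hc]
  simp only [PySem.List.pyGetD_natCast, Bool.not_eq_true', decide_eq_false_iff_not, not_or,
    not_not, E]

theorem check_eq (s : String) : check s = check_alt s := by
  unfold check check_alt
  set cs := s.toList with hcs
  have hmod : PySem.Int.mod (cs.length : Int) 2 = ((cs.length % 2 : Nat) : Int) := by
    exact_mod_cast PySem.Int.mod_natCast cs.length 2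
  have hdiv : PySem.Int.floordiv (cs.length : Int) 2 = ((cs.length / 2 : Nat) : Int) := by
    exact_mod_cast PySem.Int.floordiv_natCast cs.length 2
  rw [hmod, hdiv]
  by_cases he : cs.length % 2 = 0
  · have h0 : ¬ ((cs.length % 2 : Nat) : Int) ≠ 0 := by
      simp only [ne_eq, not_not]; exact_mod_cast he
    rw [if_neg h0, if_neg h0, PySem.List.pyRange_zero_natCast, Bool.eq_iff_iff]
    constructor
    · intro h
      rw [List.all_eq_true]
      intro x hx
      simp only [List.mem_map, List.mem_range] at hx
      obtain ⟨k, hk, rfl⟩ := hx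
      split_ifs at h with hpal
      · push Not at hpal
        rw [List.all_eq_true] at h
        have hall : ∀ c ∈ cs, c ∈ E := by
          intro c hc
          simpa [E] using h c hc
        exact (body_iff cs k hk).mpr (fwd cs hpal hall k hk)
    · intro h
      rw [List.all_eq_true] at h
      have hb : ∀ k < cs.length / 2,
          cs.getD k ' ' = cs.getD (cs.length - 1 - k) ' ' ∧ cs.getD k ' ' ∈ E := by
        intro k hk
        exact (body_iff cs k hk).mp (h _ (List.mem_map.mpr ⟨k, List.mem_range.mpr hk, rfl⟩))
      obtain ⟨hpal, hall⟩ := bwd cs he hb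
      rw [if_neg (by simpa using hpal), List.all_eq_true]
      intro c hc
      simpa [E] using hall c hc
  · have h1 : ((cs.length % 2 : Nat) : Int) ≠ 0 := by
      intro hx; exact he (by exact_mod_cast hx)
    rw [if_pos h1, if_pos h1]

-- ===== VERDICT (by name: the statement is the Claim_ definition above) =====
theorem check_spec : Claim_equal_check := by
  intro s _
  exact (check_eq s).symm ▸ rfl
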